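-- pv_equiv track=rewrite | github.com/subhashk01/subhashk01.github.io | courseVisualizer.py | getURLs_Desc
-- ===== SOURCE A (Python) =====
-- def getURLs_Desc(classLabels, classMapping):
--     URLs = []
--     descs = []
--     for label in classLabels:
--         desc, URL = classMapping[label]
--         URLs.append(URL)
--         descs.append(desc)
--     return URLs, descs
-- ===== SOURCE B (Python) =====
-- def getURLs_Desc(classLabels, classMapping):
--     if not classLabels:
--         return [], []
--     desc, URL = classMapping[classLabels[0]]
--     restURLs, restDescs = getURLs_Desc(classLabels[1:], classMapping)
--     return [URL] + restURLs, [desc] + restDescs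
-- ===== Notes on version B (the rewrite author's own statement) =====
-- stated objective: alternative
-- what changed: Replaces A's iterative loop with two growing accumulators by structural recursion on the label list that builds both result lists front-to-back by consing onto the recursive result.
import Mathlib
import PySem

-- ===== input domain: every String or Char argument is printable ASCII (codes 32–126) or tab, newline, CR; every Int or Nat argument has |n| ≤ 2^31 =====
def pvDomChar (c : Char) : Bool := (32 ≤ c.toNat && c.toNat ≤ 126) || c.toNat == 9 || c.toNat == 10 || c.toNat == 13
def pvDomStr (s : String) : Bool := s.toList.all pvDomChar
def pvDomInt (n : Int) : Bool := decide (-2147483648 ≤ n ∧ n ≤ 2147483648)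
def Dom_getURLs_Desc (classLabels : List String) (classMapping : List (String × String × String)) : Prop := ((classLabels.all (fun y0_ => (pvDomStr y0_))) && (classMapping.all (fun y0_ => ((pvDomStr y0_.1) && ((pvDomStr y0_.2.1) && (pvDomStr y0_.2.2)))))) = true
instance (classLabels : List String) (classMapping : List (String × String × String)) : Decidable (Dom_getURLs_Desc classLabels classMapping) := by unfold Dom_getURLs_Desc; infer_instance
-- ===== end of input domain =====

-- B replaces A's iterative dual-append loop by structural recursion on the label list, consing each URL/desc onto the recursive result (alternative decomposition, same cost).

-- ===== PORT A =====
-- dict lookup classMapping[label] = first match in the association list; the default ("","","")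
-- is never reached under Pre_getURLs_Desc (in Python a missing key raises KeyError).
def getURLs_Desc (classLabels : List String) (classMapping : List (String × String × String)) : List String × List String :=
  classLabels.foldl
    (fun (acc : List String × List String) label =>
      let e := (classMapping.find? (fun p => p.1 == label)).getD ("", "", "")
      (acc.1 ++ [e.2.2], acc.2 ++ [e.2.1]))
    ([], [])

-- ===== PORT B =====
-- recursion on classLabels: look up head, cons onto the recursive result for the tail
def getURLs_Desc_alt (classLabels : List String) (classMapping : List (String × String × String)) : List String × List String :=
  match classLabels with
  | [] => ([], [])
  | label :: rest =>
    let e := (classMapping.find? (fun p => p.1 == label)).getD ("", "", "")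
    let r := getURLs_Desc_alt rest classMapping
    (e.2.2 :: r.1, e.2.1 :: r.2)

-- ===== PRECONDITION & SPEC =====
-- Pre_ excludes exactly the inputs where Python A raises KeyError: some label absent from classMapping's keys.
def Pre_getURLs_Desc (classLabels : List String) (classMapping : List (String × String × String)) : Prop :=
  (classLabels.all (fun l => classMapping.any (fun p => p.1 == l))) = true
instance (classLabels : List String) (classMapping : List (String × String × String)) : Decidable (Pre_getURLs_Desc classLabels classMapping) := by unfold Pre_getURLs_Desc; infer_instance

def pvWitness_getURLs_Desc : List String × (List (String × String × String)) :=
  (["b", "a"], [("a", "descA", "urlA"), ("b", "descB", "urlB")])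

def Spec_getURLs_Desc (classLabels : List String) (classMapping : List (String × String × String)) (out : List String × List String) : Prop := out = getURLs_Desc_alt classLabels classMapping
instance (classLabels : List String) (classMapping : List (String × String × String)) (out : List String × List String) : Decidable (Spec_getURLs_Desc classLabels classMapping out) := by unfold Spec_getURLs_Desc; infer_instance

-- ===== CLAIM (what is proved, stated in full; the proofs are below) =====
def Claim_equal_getURLs_Desc : Prop := ∀ (classLabels : List String) (classMapping : List (String × String × String)), Dom_getURLs_Desc classLabels classMapping → Pre_getURLs_Desc classLabels classMapping → Spec_getURLs_Desc classLabels classMapping (getURLs_Desc classLabels classMapping)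

-- ===== LEMMAS AND PROOFS =====
theorem foldl_eq_alt (classMapping : List (String × String × String)) :
    ∀ (cl : List String) (acc : List String × List String),
      cl.foldl
        (fun (acc : List String × List String) label =>
          let e := (classMapping.find? (fun p => p.1 == label)).getD ("", "", "")
          (acc.1 ++ [e.2.2], acc.2 ++ [e.2.1])) acc
      = (acc.1 ++ (getURLs_Desc_alt cl classMapping).1,
         acc.2 ++ (getURLs_Desc_alt cl classMapping).2) := by
  intro cl
  induction cl with
  | nil => intro acc; simp [getURLs_Desc_alt]
  | cons h t ih =>
    intro acc
    simp only [List.foldl_cons, getURLs_Desc_alt]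
    rw [ih]
    simp

-- ===== VERDICT (by name: the statement is the Claim_ definition above) =====
theorem getURLs_Desc_spec : Claim_equal_getURLs_Desc := by
  intro cl cm _ _
  show _ = _
  simp only [getURLs_Desc]
  rw [foldl_eq_alt]
  simp
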